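-- pv_equiv track=rewrite | github.com/evbeda/games2 | poker/poker.py | combine_card
-- ===== SOURCE A (Python) =====
-- five_cards_combinations = [
--     [0, 1, 2, 3, 4],
--     [0, 1, 2, 3, 5],
--     [0, 1, 2, 3, 6],
--     [0, 1, 2, 4, 5],
--     [0, 1, 2, 4, 6],
--     [0, 1, 2, 5, 6],
--     [0, 1, 3, 4, 5],
--     [0, 1, 3, 4, 6],
--     [0, 1, 3, 5, 6],
--     [0, 1, 4, 5, 6],
--     [0, 2, 3, 4, 5],
--     [0, 2, 3, 4, 6],
--     [0, 2, 3, 5, 6],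
--     [0, 2, 4, 5, 6],
--     [0, 3, 4, 5, 6],
--     [1, 2, 3, 4, 5],
--     [1, 2, 3, 4, 6],
--     [1, 2, 3, 5, 6],
--     [1, 2, 4, 5, 6],
--     [1, 3, 4, 5, 6],
--     [2, 3, 4, 5, 6],
-- ]
--
-- def combine_card(complete_card):
--     all_combination = []
--     for index_combination in five_cards_combinations:
--         card_combination = []
--         for index in index_combination:
--             card_combination.append(complete_card[index])
--         all_combination.append(card_combination)
--     return all_combination
-- ===== SOURCE B (Python) =====
-- def combine_card(complete_card):
--     # Choosing 5 of the 7 cards = dropping 2 of them: walk the pairs of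
--     # dropped positions (i, j) from the right, which yields the kept
--     # 5-card hands in lexicographic order.
--     cards = [complete_card[k] for k in range(7)]
--     all_combination = []
--     for i in range(5, -1, -1):
--         for j in range(6, i, -1):
--             all_combination.append([cards[k] for k in range(7) if k != i and k != j])
--     return all_combination
-- ===== Notes on version B (the rewrite author's own statement) =====
-- stated objective: alternative
-- what changed: Instead of reading 5 kept indices from a hardcoded 21-row table, B enumerates the complementary pairs of DROPPED positions (i,j), walking them from the right so the kept 5-card hands come out in the same lexicographic order; like A it raises IndexError when fewer than 7 cards are given.
import Mathlib
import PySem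

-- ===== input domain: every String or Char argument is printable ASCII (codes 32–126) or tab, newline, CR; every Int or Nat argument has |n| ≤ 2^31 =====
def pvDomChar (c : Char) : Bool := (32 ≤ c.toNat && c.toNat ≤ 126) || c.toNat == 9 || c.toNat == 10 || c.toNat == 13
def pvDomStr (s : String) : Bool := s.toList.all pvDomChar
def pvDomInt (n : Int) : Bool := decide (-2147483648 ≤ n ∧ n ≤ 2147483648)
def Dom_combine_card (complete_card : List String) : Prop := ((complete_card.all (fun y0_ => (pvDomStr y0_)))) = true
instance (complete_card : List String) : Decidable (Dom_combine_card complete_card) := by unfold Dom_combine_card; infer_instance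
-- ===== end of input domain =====

-- B enumerates the complementary pairs of dropped positions instead of A's
-- hardcoded 21-row table of kept indices (alternative decomposition, same cost).

-- ===== PORT A =====
-- the module-level constant table, verbatim
def five_cards_combinations : List (List Int) :=
  [[0, 1, 2, 3, 4], [0, 1, 2, 3, 5], [0, 1, 2, 3, 6], [0, 1, 2, 4, 5],
   [0, 1, 2, 4, 6], [0, 1, 2, 5, 6], [0, 1, 3, 4, 5], [0, 1, 3, 4, 6],
   [0, 1, 3, 5, 6], [0, 1, 4, 5, 6], [0, 2, 3, 4, 5], [0, 2, 3, 4, 6],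
   [0, 2, 3, 5, 6], [0, 2, 4, 5, 6], [0, 3, 4, 5, 6], [1, 2, 3, 4, 5],
   [1, 2, 3, 4, 6], [1, 2, 3, 5, 6], [1, 2, 4, 5, 6], [1, 3, 4, 5, 6],
   [2, 3, 4, 5, 6]]

-- complete_card[index]; Pre_ guarantees the index is in range, so the `getD ""`
-- default is never used on admitted inputs (A raises IndexError outside Pre_)
def combine_card (complete_card : List String) : List (List String) :=
  five_cards_combinations.foldl
    (fun all_combination index_combination =>
      all_combination ++
        [index_combination.foldl
          (fun card_combination index =>
            card_combination ++ [(PySem.List.pyGet? complete_card index).getD ""])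
          []])
    []

-- ===== PORT B =====
def combine_card_alt (complete_card : List String) : List (List String) :=
  -- cards = [complete_card[k] for k in range(7)]; raises IndexError (outside
  -- Pre_) when fewer than 7 cards, so the `getD ""` default is never used
  let cards := (PySem.List.pyRange 0 7 1).map
    (fun k => (PySem.List.pyGet? complete_card k).getD "")
  (PySem.List.pyRange 5 (-1) (-1)).foldl
    (fun all_combination i =>
      (PySem.List.pyRange 6 i (-1)).foldl
        (fun all_combination j =>
          all_combination ++
            [((PySem.List.pyRange 0 7 1).filter (fun k => k ≠ i && k ≠ j)).map
              (fun k => (PySem.List.pyGet? cards k).getD "")])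
        all_combination)
    []

-- ===== PRECONDITION & SPEC =====
-- A indexes complete_card[0..6]; it raises IndexError with fewer than 7 cards.
def Pre_combine_card (complete_card : List String) : Prop := 7 ≤ complete_card.length
instance (complete_card : List String) : Decidable (Pre_combine_card complete_card) := by
  unfold Pre_combine_card; infer_instance

def pvWitness_combine_card : List String := ["AS", "KS", "QS", "JS", "TS", "9S", "8S"]

def Spec_combine_card (complete_card : List String) (out : List (List String)) : Prop :=
  out = combine_card_alt complete_card
instance (complete_card : List String) (out : List (List String)) :
    Decidable (Spec_combine_card complete_card out) := by
  unfold Spec_combine_card; infer_instance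

-- ===== CLAIM =====
def Claim_equal_combine_card : Prop :=
  ∀ (complete_card : List String), Dom_combine_card complete_card →
    Pre_combine_card complete_card →
    Spec_combine_card complete_card (combine_card complete_card)

-- ===== LEMMAS AND PROOFS =====

-- ===== VERDICT =====
theorem combine_card_spec : Claim_equal_combine_card := by
  intro cc _ hpre
  unfold Spec_combine_card
  match cc, hpre with
  | a :: b :: c :: d :: e :: f :: g :: rest, _ =>
    rfl
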